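-- pv_equiv track=rewrite | github.com/DevABM/HackerRank_25 | Codes/SameString.py | sameSubstring
-- ===== SOURCE A (Python) =====
-- def sameSubstring(s, t, k):
--     n = len(s)
--     max_length = 0
--     current_cost = 0
--     start = 0
--
--     for end in range(n):
--         current_cost += abs(ord(s[end]) - ord(t[end]))
--
--         while current_cost > k:
--             current_cost -= abs(ord(s[start]) - ord(t[start]))
--             start += 1
--
--         max_length = max(max_length, end - start + 1)
--
--     return max_length
-- ===== SOURCE B (Python) =====
-- def sameSubstring(s, t, k):
--     n = len(s)
--     P = [0] * (n + 1)
--     for i in range(n):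
--         P[i + 1] = P[i] + abs(ord(s[i]) - ord(t[i]))
--     best = 0
--     for j in range(n):
--         target = P[j + 1] - k
--         lo, hi = 0, j + 1
--         while lo < hi:
--             mid = (lo + hi) // 2
--             if P[mid] < target:
--                 lo = mid + 1
--             else:
--                 hi = mid
--         best = max(best, j + 1 - lo)
--     return best
-- ===== Notes on version B (the rewrite author's own statement) =====
-- stated objective: alternative
-- what changed: Replaced A's amortized two-pointer sliding window (running cost with eviction loop) by a precomputed prefix-sum table of per-index costs plus a hand-written bisect_left binary search per end index for the smallest valid window start.
import Mathlib
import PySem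

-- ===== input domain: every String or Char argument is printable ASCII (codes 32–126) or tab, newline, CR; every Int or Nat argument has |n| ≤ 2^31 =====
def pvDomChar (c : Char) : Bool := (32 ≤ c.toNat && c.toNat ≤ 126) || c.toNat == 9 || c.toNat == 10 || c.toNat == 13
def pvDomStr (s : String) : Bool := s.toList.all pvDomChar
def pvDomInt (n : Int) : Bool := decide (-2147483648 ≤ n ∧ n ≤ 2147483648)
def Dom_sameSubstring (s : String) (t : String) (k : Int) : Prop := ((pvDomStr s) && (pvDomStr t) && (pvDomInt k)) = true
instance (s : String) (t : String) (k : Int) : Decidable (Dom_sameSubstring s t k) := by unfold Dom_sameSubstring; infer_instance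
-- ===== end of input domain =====

-- B replaces A's two-pointer sliding window by a prefix-sum table plus per-end binary search
-- (objective: alternative algorithm, not faster — A is O(n), B is O(n log n)).

-- ===== PORT A =====
-- |ord s[i] - ord t[i]| (both Pythons compute this same expression; in-range on all admitted inputs)
def pvCost (ss ts : List Char) (i : Nat) : Int :=
  |((ss.getD i ' ').toNat : Int) - ((ts.getD i ' ').toNat : Int)|

-- the inner `while current_cost > k` loop; fuel n+1 bounds its iterations on all admitted inputs
def pvAWhile (ss ts : List Char) (k : Int) : Int → Nat → Nat → Int × Nat
  | cost, start, 0 => (cost, start)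
  | cost, start, fuel + 1 =>
    if k < cost then pvAWhile ss ts k (cost - pvCost ss ts start) (start + 1) fuel
    else (cost, start)

def sameSubstring (s : String) (t : String) (k : Int) : Int :=
  let ss := s.toList
  let ts := t.toList
  let n := ss.length
  (List.foldl (fun (st : Int × Int × Nat) (e : Nat) =>
      let c := st.2.1 + pvCost ss ts e
      let w := pvAWhile ss ts k c st.2.2 (n + 1)
      (max st.1 ((e : Int) - (w.2 : Int) + 1), w.1, w.2))
    (0, 0, 0) (List.range n)).1

-- ===== PORT B =====
-- hand-written bisect_left of Source B (the `while lo < hi` binary search)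
-- fuel hi-lo+1 bounds the iterations of the `while lo < hi` loop (hi-lo shrinks each turn)
def pvBisectLeft (P : List Int) (target : Int) : Nat → Nat → Nat → Nat
  | lo, _, 0 => lo
  | lo, hi, fuel + 1 =>
    if lo < hi then
      if P.getD ((lo + hi) / 2) 0 < target then pvBisectLeft P target ((lo + hi) / 2 + 1) hi fuel
      else pvBisectLeft P target lo ((lo + hi) / 2) fuel
    else lo

def sameSubstring_alt (s : String) (t : String) (k : Int) : Int :=
  let ss := s.toList
  let ts := t.toList
  let n := ss.length
  let P := List.foldl (fun P i => P ++ [P.getD i 0 + pvCost ss ts i]) [0] (List.range n)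
  List.foldl (fun best j =>
      let lo := pvBisectLeft P (P.getD (j + 1) 0 - k) 0 (j + 1) (j + 2)
      max best ((j : Int) + 1 - (lo : Int)))
    0 (List.range n)

-- ===== PRECONDITION & SPEC =====
-- Pre_ excludes exactly the inputs where Python A raises IndexError: t shorter than s (t[end]
-- is read for every end < len(s)), and k < 0 with s nonempty (the eviction loop walks start
-- past the end of s, since every window cost is ≥ 0 > k).
def Pre_sameSubstring (s : String) (t : String) (k : Int) : Prop :=
  s.toList.length ≤ t.toList.length ∧ (0 ≤ k ∨ s.toList.length = 0)
instance (s : String) (t : String) (k : Int) : Decidable (Pre_sameSubstring s t k) := by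
  unfold Pre_sameSubstring; infer_instance

def pvWitness_sameSubstring : String × String × Int := ("ab", "bb", 1)

def Spec_sameSubstring (s : String) (t : String) (k : Int) (out : Int) : Prop := out = sameSubstring_alt s t k
instance (s : String) (t : String) (k : Int) (out : Int) : Decidable (Spec_sameSubstring s t k out) := by unfold Spec_sameSubstring; infer_instance

-- ===== CLAIM (what is proved, stated in full; the proofs are below) =====
def Claim_equal_sameSubstring : Prop := ∀ (s : String) (t : String) (k : Int), Dom_sameSubstring s t k → Pre_sameSubstring s t k → Spec_sameSubstring s t k (sameSubstring s t k)

-- ===== LEMMAS AND PROOFS =====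

-- prefix sums of the per-index costs
def pvPfx (ss ts : List Char) : Nat → Int
  | 0 => 0
  | j + 1 => pvPfx ss ts j + pvCost ss ts j

lemma pvCost_nonneg (ss ts : List Char) (i : Nat) : 0 ≤ pvCost ss ts i := abs_nonneg _

lemma pvPfx_mono (ss ts : List Char) {i j : Nat} (h : i ≤ j) :
    pvPfx ss ts i ≤ pvPfx ss ts j := by
  induction h with
  | refl => exact le_refl _
  | @step j h ih => exact le_trans ih (by have := pvCost_nonneg ss ts j; simp [pvPfx]; omega)

-- least start index for window ending at e: least i with pfx (e+1) - pfx i ≤ k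
def pvMIdx (ss ts : List Char) (k : Int) (e : Nat) : Nat :=
  Nat.find (p := fun i => pvPfx ss ts (e + 1) ≤ k + pvPfx ss ts i ∨ e + 1 ≤ i)
    ⟨e + 1, Or.inr le_rfl⟩

-- running best value after the first e loop iterations (common to both programs)
def pvBest (ss ts : List Char) (k : Int) : Nat → Int
  | 0 => 0
  | e + 1 => max (pvBest ss ts k e) ((e : Int) - (pvMIdx ss ts k e : Int) + 1)

lemma pvMIdx_le (ss ts : List Char) (k : Int) (e : Nat) : pvMIdx ss ts k e ≤ e + 1 :=
  Nat.find_le (Or.inr le_rfl)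

lemma pvMIdx_spec (ss ts : List Char) (k : Int) (hk : 0 ≤ k) (e : Nat) :
    pvPfx ss ts (e + 1) ≤ k + pvPfx ss ts (pvMIdx ss ts k e) := by
  unfold pvMIdx
  rcases Nat.find_spec (p := fun i => pvPfx ss ts (e + 1) ≤ k + pvPfx ss ts i ∨ e + 1 ≤ i)
      ⟨e + 1, Or.inr le_rfl⟩ with h | h
  · exact h
  · have := pvPfx_mono ss ts h
    omega

lemma pvMIdx_min (ss ts : List Char) (k : Int) (e : Nat) {i : Nat}
    (hi : i < pvMIdx ss ts k e) : k + pvPfx ss ts i < pvPfx ss ts (e + 1) := by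
  have h := Nat.find_min (p := fun i => pvPfx ss ts (e + 1) ≤ k + pvPfx ss ts i ∨ e + 1 ≤ i)
      ⟨e + 1, Or.inr le_rfl⟩ hi
  simp only [not_or, not_le] at h
  omega

lemma pvMIdx_mono (ss ts : List Char) (k : Int) (e : Nat) :
    pvMIdx ss ts k e ≤ pvMIdx ss ts k (e + 1) := by
  conv_rhs => rw [pvMIdx]
  rw [Nat.le_find_iff]
  intro m hm
  rcases Nat.lt_or_ge m (pvMIdx ss ts k e) with hm' | hm'
  · have h1 := pvMIdx_min ss ts k e hm'
    have h2 := pvMIdx_le ss ts k e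
    have h3 : pvPfx ss ts (e + 1) ≤ pvPfx ss ts (e + 1 + 1) := pvPfx_mono ss ts (by omega)
    rintro (h | h) <;> omega
  · omega

lemma pvAWhile_eq (ss ts : List Char) (k : Int) (hk : 0 ≤ k) (e : Nat) :
    ∀ fuel start, start ≤ pvMIdx ss ts k e → pvMIdx ss ts k e ≤ start + fuel →
    pvAWhile ss ts k (pvPfx ss ts (e + 1) - pvPfx ss ts start) start fuel
      = (pvPfx ss ts (e + 1) - pvPfx ss ts (pvMIdx ss ts k e), pvMIdx ss ts k e) := by
  intro fuel
  induction fuel with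
  | zero =>
    intro start hs hf
    have : start = pvMIdx ss ts k e := by omega
    subst this
    rfl
  | succ f ih =>
    intro start hs hf
    rw [pvAWhile]
    split_ifs with hc
    · -- current_cost > k : evict
      have hne : start ≠ pvMIdx ss ts k e := by
        intro h
        have := pvMIdx_spec ss ts k hk e
        rw [← h] at this
        omega
      have hlt : start < pvMIdx ss ts k e := lt_of_le_of_ne hs hne
      have harg : pvPfx ss ts (e + 1) - pvPfx ss ts start - pvCost ss ts start
          = pvPfx ss ts (e + 1) - pvPfx ss ts (start + 1) := by
        simp [pvPfx]; ring
      rw [harg]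
      exact ih (start + 1) hlt (by omega)
    · -- current_cost ≤ k : stop; start must already be the least index
      have : ¬ start < pvMIdx ss ts k e := by
        intro hlt
        have := pvMIdx_min ss ts k e hlt
        omega
      have : start = pvMIdx ss ts k e := by omega
      subst this
      rfl

-- start index held by A's loop when e iterations have been performed
def pvSIdx (ss ts : List Char) (k : Int) : Nat → Nat
  | 0 => 0
  | e + 1 => pvMIdx ss ts k e

lemma pvSIdx_le_mIdx (ss ts : List Char) (k : Int) (e : Nat) :
    pvSIdx ss ts k e ≤ pvMIdx ss ts k e := by
  cases e with
  | zero => exact Nat.zero_le _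
  | succ e => exact pvMIdx_mono ss ts k e

lemma pvA_fold (ss ts : List Char) (k : Int) (hk : 0 ≤ k) (n : Nat) :
    ∀ e, e ≤ n →
    List.foldl (fun (st : Int × Int × Nat) (e : Nat) =>
        let c := st.2.1 + pvCost ss ts e
        let w := pvAWhile ss ts k c st.2.2 (n + 1)
        (max st.1 ((e : Int) - (w.2 : Int) + 1), w.1, w.2))
      (0, 0, 0) (List.range e)
    = (pvBest ss ts k e, pvPfx ss ts e - pvPfx ss ts (pvSIdx ss ts k e), pvSIdx ss ts k e) := by
  intro e
  induction e with
  | zero => intro _; simp [pvBest, pvSIdx, pvPfx]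
  | succ e ih =>
    intro he
    rw [List.range_succ, List.foldl_append, ih (by omega), List.foldl_cons, List.foldl_nil]
    have hc : pvPfx ss ts e - pvPfx ss ts (pvSIdx ss ts k e) + pvCost ss ts e
        = pvPfx ss ts (e + 1) - pvPfx ss ts (pvSIdx ss ts k e) := by
      simp [pvPfx]; ring
    simp only [hc]
    rw [pvAWhile_eq ss ts k hk e (n + 1) (pvSIdx ss ts k e) (pvSIdx_le_mIdx ss ts k e)
      (by have := pvMIdx_le ss ts k e; omega)]
    simp [pvBest, pvSIdx]

lemma pvGetD_map_range (f : Nat → Int) {j m : Nat} (h : j < m) :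
    ((List.range m).map f).getD j 0 = f j := by
  simp [List.getD, h]

lemma pvPlist_eq (ss ts : List Char) :
    ∀ n, List.foldl (fun P i => P ++ [P.getD i 0 + pvCost ss ts i]) [0] (List.range n)
      = (List.range (n + 1)).map (pvPfx ss ts) := by
  intro n
  induction n with
  | zero => simp [pvPfx]
  | succ n ih =>
    rw [List.range_succ, List.foldl_append, ih, List.foldl_cons, List.foldl_nil,
      pvGetD_map_range _ (by omega)]
    rw [List.range_succ (n := n + 1), List.map_append]
    simp [pvPfx]

lemma pvBisect_char (P : List Int) (target : Int) (m : Nat) :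
    ∀ fuel lo hi, hi ≤ lo + fuel → lo ≤ m → m ≤ hi →
    (∀ i, i < m → P.getD i 0 < target) →
    (∀ i, m ≤ i → i < hi → target ≤ P.getD i 0) →
    pvBisectLeft P target lo hi fuel = m := by
  intro fuel
  induction fuel with
  | zero =>
    intro lo hi hf hlo hhi _ _
    have : lo = m := by omega
    subst this
    rfl
  | succ f ih =>
    intro lo hi hf hlo hhi hlow hhigh
    rw [pvBisectLeft]
    split_ifs with h1 h2
    · -- P[mid] < target, hence mid < m
      have hmid : (lo + hi) / 2 < m := by
        by_contra hm
        have := hhigh ((lo + hi) / 2) (by omega) (by omega)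
        omega
      exact ih ((lo + hi) / 2 + 1) hi (by omega) (by omega) hhi hlow hhigh
    · -- target ≤ P[mid], hence m ≤ mid
      have hmid : m ≤ (lo + hi) / 2 := by
        by_contra hm
        have := hlow ((lo + hi) / 2) (by omega)
        omega
      exact ih lo ((lo + hi) / 2) (by omega) hlo (by omega) hlow
        (fun i h1 h2 => hhigh i h1 (by omega))
    · -- lo ≥ hi
      have : lo = m := by omega
      subst this
      rfl

lemma pvBisect_eq_mIdx (ss ts : List Char) (k : Int) (hk : 0 ≤ k) (n j : Nat) (hj : j < n) :
    pvBisectLeft ((List.range (n + 1)).map (pvPfx ss ts))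
        (((List.range (n + 1)).map (pvPfx ss ts)).getD (j + 1) 0 - k) 0 (j + 1) (j + 2)
      = pvMIdx ss ts k j := by
  have hm1 := pvMIdx_le ss ts k j
  rw [pvGetD_map_range _ (by omega)]
  apply pvBisect_char
  · omega
  · omega
  · omega
  · intro i hi
    rw [pvGetD_map_range _ (by omega)]
    have := pvMIdx_min ss ts k j hi
    omega
  · intro i h1 h2
    rw [pvGetD_map_range _ (by omega)]
    have := pvMIdx_spec ss ts k hk j
    have := pvPfx_mono ss ts h1
    omega

lemma pvB_fold (ss ts : List Char) (k : Int) (hk : 0 ≤ k) (P : List Int) (n : Nat)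
    (hP : P = (List.range (n + 1)).map (pvPfx ss ts)) :
    ∀ e, e ≤ n →
    List.foldl (fun best j =>
        let lo := pvBisectLeft P (P.getD (j + 1) 0 - k) 0 (j + 1) (j + 2)
        max best ((j : Int) + 1 - (lo : Int)))
      0 (List.range e)
    = pvBest ss ts k e := by
  intro e
  induction e with
  | zero => intro _; simp [pvBest]
  | succ e ih =>
    intro he
    rw [List.range_succ, List.foldl_append, ih (by omega), List.foldl_cons, List.foldl_nil]
    simp only [hP, pvBisect_eq_mIdx ss ts k hk n e (by omega), pvBest]
    congr 1
    omega

-- ===== VERDICT (by name: the statement is the Claim_ definition above) =====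
theorem sameSubstring_spec : Claim_equal_sameSubstring := by
  intro s t k _ hpre
  unfold Spec_sameSubstring
  rcases hpre with ⟨_, hk | hn⟩
  · simp only [sameSubstring, sameSubstring_alt]
    rw [pvPlist_eq s.toList t.toList]
    rw [pvA_fold s.toList t.toList k hk s.toList.length s.toList.length (le_refl _)]
    rw [pvB_fold s.toList t.toList k hk _ s.toList.length rfl s.toList.length (le_refl _)]
  · rw [List.length_eq_zero_iff] at hn
    simp [sameSubstring, sameSubstring_alt, hn]
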